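-- pv_equiv track=rewrite | github.com/markku63/mooc-tira-s20 | wordpairs.py | count
-- ===== SOURCE A (Python) =====
-- def count(t):
--     count = 0
--     charsets = {}
--     for w in t:
--         chars = frozenset(w)
--         n = charsets.setdefault(chars, 0)
--         count += n
--         charsets[chars] = n + 1
--
--     return count
-- ===== SOURCE B (Python) =====
-- def count(t):
--     # Sort-then-scan: canonicalise each word's character set to a sorted string,
--     # sort all keys, then count pairs inside each maximal run of equal keys.
--     keys = sorted("".join(sorted(set(w))) for w in t)
--     total = 0
--     run = 0
--     prev = None
--     for k in keys:
--         if k == prev: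
--             run += 1
--         else:
--             total += run * (run - 1) // 2
--             run = 1
--             prev = k
--     return total + run * (run - 1) // 2
-- ===== Notes on version B (the rewrite author's own statement) =====
-- stated objective: alternative
-- what changed: Replaces A's hash-map of running group sizes with sort-then-scan: each word's character set is canonicalised to a sorted string, the key list is sorted, and one linear scan sums n*(n-1)//2 over maximal runs of equal keys; no dictionary is used.
import Mathlib
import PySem

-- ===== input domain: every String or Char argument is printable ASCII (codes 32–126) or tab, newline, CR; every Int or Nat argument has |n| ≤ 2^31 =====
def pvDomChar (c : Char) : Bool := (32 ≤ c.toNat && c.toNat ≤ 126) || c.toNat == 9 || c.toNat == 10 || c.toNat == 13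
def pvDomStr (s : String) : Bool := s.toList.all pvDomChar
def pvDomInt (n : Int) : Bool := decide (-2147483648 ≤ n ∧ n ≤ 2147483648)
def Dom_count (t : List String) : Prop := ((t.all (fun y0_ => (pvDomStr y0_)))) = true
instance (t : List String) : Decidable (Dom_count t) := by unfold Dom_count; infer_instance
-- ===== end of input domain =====

-- B replaces A's hash-map of running group sizes with sort-then-scan (sort canonical
-- character-set keys, then one pass over runs of equal keys); alternative algorithm, no speed claim.


-- frozenset(w): modelled as the canonical (sorted, duplicate-free) list of w's characters,
-- so that key equality is exactly equality of character sets.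
def pvKey (w : String) : List Char := PySem.List.sorted (PySem.Set.ofList w.toList) (fun c => c) false

-- ===== PORT A =====
def count (t : List String) : Int :=
  (t.foldl (fun s w =>
    let chars := pvKey w
    let charsets := s.2.setdefault chars 0
    let n := charsets.getD chars 0
    (s.1 + n, charsets.insert chars (n + 1)))
    ((0 : Int), (PySem.Dict.empty : PySem.Dict (List Char) Int))).1

-- ===== PORT B =====
-- "".join(sorted(set(w))): the same canonical character list, joined into a string key.
def pvKeyS (w : String) : String := String.ofList (PySem.List.sorted (PySem.Set.ofList w.toList) (fun c => c) false)

def count_alt (t : List String) : Int :=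
  let keys := PySem.List.sorted (t.map pvKeyS) (fun k => k) false
  let s := keys.foldl (fun (st : Int × Int × Option String) k =>
      if some k == st.2.2 then (st.1, st.2.1 + 1, st.2.2)
      else (st.1 + PySem.Int.floordiv (st.2.1 * (st.2.1 - 1)) 2, 1, some k))
    ((0 : Int), (0 : Int), (none : Option String))
  s.1 + PySem.Int.floordiv (s.2.1 * (s.2.1 - 1)) 2

-- ===== PRECONDITION & SPEC =====
def Spec_count (t : List String) (out : Int) : Prop := out = count_alt t
instance (t : List String) (out : Int) : Decidable (Spec_count t out) := by unfold Spec_count; infer_instance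

-- ===== CLAIM (what is proved, stated in full; the proofs are below) =====
def Claim_equal_count : Prop := ∀ (t : List String), Dom_count t → Spec_count t (count t)

-- ===== LEMMAS AND PROOFS =====

-- C(n,2) as both programs compute it: n*(n-1)//2
def pvC2 (n : Int) : Int := PySem.Int.floordiv (n * (n - 1)) 2

-- number of unordered pairs of equal elements
def pvPC {α : Type} [BEq α] [LawfulBEq α] : List α → Int
  | [] => 0
  | x :: xs => (xs.count x : Int) + pvPC xs

lemma pvFdiv_two_mul (x : Int) : PySem.Int.floordiv (2 * x) 2 = x := by
  show (2 * x).fdiv 2 = x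
  exact Int.mul_fdiv_cancel_left x (by norm_num)

lemma pvC2_succ (n : Int) : pvC2 (n + 1) = pvC2 n + n := by
  obtain ⟨a, ha⟩ := Int.even_mul_succ_self (n - 1)
  obtain ⟨b, hb⟩ := Int.even_mul_succ_self n
  have h1 : n * (n - 1) = 2 * a := by linear_combination ha
  have h2 : (n + 1) * ((n + 1) - 1) = 2 * b := by linear_combination hb
  have h4 : 2 * b = 2 * a + 2 * n := by linear_combination ha - hb
  unfold pvC2
  rw [h1, h2, pvFdiv_two_mul, pvFdiv_two_mul]
  omega

lemma pvC2_one : pvC2 1 = 0 := by decide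
lemma pvC2_zero : pvC2 0 = 0 := by decide

-- pvPC is invariant under permutation
lemma pvPC_perm {α : Type} [BEq α] [LawfulBEq α] {xs ys : List α} (h : xs.Perm ys) :
    pvPC xs = pvPC ys := by
  induction h with
  | nil => rfl
  | cons x h ih => simp [pvPC, ih, h.count_eq]
  | swap x y l =>
    simp only [pvPC, List.count_cons]
    split_ifs with h1 h2 h3
    · push_cast; ring
    · exact absurd (by simp [eq_of_beq h1]) h2
    · exact absurd (by simp [eq_of_beq h3]) h1
    · push_cast; ring
  | trans _ _ ih1 ih2 => exact ih1.trans ih2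

-- pvPC through an injective map
lemma pvPC_map {α β : Type} [BEq α] [LawfulBEq α] [BEq β] [LawfulBEq β] (f : α → β)
    (hf : Function.Injective f) (xs : List α) : pvPC (xs.map f) = pvPC xs := by
  induction xs with
  | nil => rfl
  | cons x xs ih => simp [pvPC, ih, List.count_map_of_injective _ f hf]

-- ===== A side: the running accumulator counts equal pairs =====

-- A's loop body, simplified: setdefault-then-overwrite is a single insert
lemma pvStepA_eq (d : PySem.Dict (List Char) Int) (k : List Char) :
    (d.setdefault k 0).insert k ((d.setdefault k 0).getD k 0 + 1)
      = d.insert k (d.getD k 0 + 1) := by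
  rw [PySem.Dict.getD_setdefault_self]
  by_cases hc : d.contains k = true
  · rw [PySem.Dict.setdefault_of_contains d 0 hc]
  · rw [PySem.Dict.setdefault_of_not_contains d 0 (by simpa using hc),
      PySem.Dict.insert_insert_self]

-- cross pairs between an already-seen multiset m and the rest
def pvCross (m : List (List Char)) : List (List Char) → Int
  | [] => 0
  | x :: ks => (m.count x : Int) + pvCross m ks

lemma pvCross_nil (ks : List (List Char)) : pvCross [] ks = 0 := by
  induction ks with
  | nil => rfl
  | cons y ys ih => simp [pvCross, ih]

lemma pvCross_cons (a : List Char) (m ks : List (List Char)) :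
    pvCross (a :: m) ks = pvCross m ks + (ks.count a : Int) := by
  induction ks with
  | nil => simp [pvCross]
  | cons y ys ih =>
    simp only [pvCross, List.count_cons]
    rw [ih]
    split_ifs with h1 h2 h3
    · push_cast; ring
    · exact absurd (by simp [eq_of_beq h1]) h2
    · exact absurd (by simp [eq_of_beq h3]) h1
    · push_cast; ring

lemma pvLoopA (t : List String) :
    ∀ (c : Int) (d : PySem.Dict (List Char) Int) (m : List (List Char)),
    (∀ k, d.getD k 0 = (m.count k : Int)) →
    (t.foldl (fun s w =>
      (s.1 + (s.2.setdefault (pvKey w) 0).getD (pvKey w) 0,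
        (s.2.setdefault (pvKey w) 0).insert (pvKey w)
          ((s.2.setdefault (pvKey w) 0).getD (pvKey w) 0 + 1))) (c, d)).1
    = c + pvCross m (t.map pvKey) + pvPC (t.map pvKey) := by
  induction t with
  | nil => intro c d m _; simp [pvCross, pvPC]
  | cons w tl ih =>
    intro c d m hinv
    rw [List.foldl_cons]
    dsimp only
    rw [pvStepA_eq, PySem.Dict.getD_setdefault_self]
    have hinv' : ∀ k, (d.insert (pvKey w) (d.getD (pvKey w) 0 + 1)).getD k 0
        = ((pvKey w :: m).count k : Int) := by
      intro k
      rw [PySem.Dict.getD_insert, List.count_cons]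
      by_cases hk : k = pvKey w
      · rw [if_pos hk, hinv, hk]
        simp
      · rw [if_neg hk, hinv]
        simp [beq_iff_eq, Ne.symm hk]
    rw [ih (c + d.getD (pvKey w) 0) _ (pvKey w :: m) hinv', hinv (pvKey w)]
    simp only [List.map_cons, pvPC, pvCross_cons, pvCross]
    ring

lemma pvCountA (t : List String) : count t = pvPC (t.map pvKey) := by
  unfold count
  have hfun : (fun (s : Int × PySem.Dict (List Char) Int) (w : String) =>
      let chars := pvKey w
      let charsets := s.2.setdefault chars 0
      let n := charsets.getD chars 0
      (s.1 + n, charsets.insert chars (n + 1)))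
    = (fun (s : Int × PySem.Dict (List Char) Int) (w : String) =>
      (s.1 + (s.2.setdefault (pvKey w) 0).getD (pvKey w) 0,
        (s.2.setdefault (pvKey w) 0).insert (pvKey w)
          ((s.2.setdefault (pvKey w) 0).getD (pvKey w) 0 + 1))) := rfl
  rw [hfun, pvLoopA t 0 PySem.Dict.empty []
    (fun k => by simp [PySem.Dict.getD_of_not_contains]), pvCross_nil]
  ring

-- ===== B side: the run scan over a sorted list counts equal pairs =====

def pvStepB : (Int × Int × Option String) → String → (Int × Int × Option String) :=
  fun st k =>
    if some k == st.2.2 then (st.1, st.2.1 + 1, st.2.2)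
    else (st.1 + PySem.Int.floordiv (st.2.1 * (st.2.1 - 1)) 2, 1, some k)

lemma pvScan (l : List String) :
    ∀ (tot run : Int) (p : String),
    l.Pairwise (· ≤ ·) → (∀ x ∈ l, p ≤ x) →
    (l.foldl pvStepB (tot, run, some p)).1 + pvC2 (l.foldl pvStepB (tot, run, some p)).2.1
      = tot + pvC2 run + run * (l.count p : Int) + pvPC l := by
  induction l with
  | nil => intro tot run p _ _; simp [pvPC]
  | cons x xs ih =>
    intro tot run p hpw hle
    have hxs : xs.Pairwise (· ≤ ·) := hpw.of_cons
    have hxle : ∀ y ∈ xs, x ≤ y := fun y hy => List.rel_of_pairwise_cons hpw hy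
    by_cases hxp : x = p
    · subst hxp
      have hstep : pvStepB (tot, run, some x) x = (tot, run + 1, some x) := by
        simp [pvStepB]
      rw [List.foldl_cons, hstep, ih tot (run + 1) x hxs hxle]
      simp only [List.count_cons_self, pvPC, pvC2_succ]
      push_cast
      ring
    · have hstep : pvStepB (tot, run, some p) x
          = (tot + pvC2 run, 1, some x) := by
        simp [pvStepB, pvC2, hxp]
      have hplt : p < x := lt_of_le_of_ne (hle x List.mem_cons_self) (Ne.symm hxp)
      have hcnt : (x :: xs).count p = 0 := by
        rw [List.count_eq_zero]
        intro hmem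
        rcases List.mem_cons.mp hmem with h | h
        · exact hxp h.symm
        · exact absurd (hplt.trans_le (hxle p h)) (lt_irrefl p)
      rw [List.foldl_cons, hstep, ih (tot + pvC2 run) 1 x hxs hxle]
      simp only [hcnt, pvPC, pvC2_one]
      push_cast
      ring

lemma pvCountB (t : List String) :
    count_alt t = pvPC (PySem.List.sorted (t.map pvKeyS) (fun k => k) false) := by
  show ((PySem.List.sorted (t.map pvKeyS) (fun k => k) false).foldl pvStepB (0, 0, none)).1
      + pvC2 ((PySem.List.sorted (t.map pvKeyS) (fun k => k) false).foldl pvStepB (0, 0, none)).2.1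
    = pvPC (PySem.List.sorted (t.map pvKeyS) (fun k => k) false)
  cases hkeys : PySem.List.sorted (t.map pvKeyS) (fun k => k) false with
  | nil => decide
  | cons x xs =>
    have hpw := PySem.List.sorted_pairwise (t.map pvKeyS) (fun k => k)
    rw [hkeys] at hpw
    have hstep : pvStepB (0, 0, none) x = (0 + pvC2 0, 1, some x) := by
      simp [pvStepB, pvC2]
    rw [List.foldl_cons, hstep,
      pvScan xs (0 + pvC2 0) 1 x hpw.of_cons
        (fun y hy => List.rel_of_pairwise_cons hpw hy)]
    simp only [pvPC, pvC2_zero, pvC2_one]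
    push_cast
    ring

-- ===== VERDICT (by name: the statement is the Claim_ definition above) =====
theorem count_spec : Claim_equal_count := by
  intro t _
  show count t = count_alt t
  rw [pvCountA, pvCountB,
    pvPC_perm (PySem.List.sorted_perm (t.map pvKeyS) (fun k => k) false)]
  have hmap : t.map pvKeyS = (t.map pvKey).map String.ofList := by
    simp [pvKeyS, pvKey, Function.comp_def]
  rw [hmap, pvPC_map String.ofList
    (fun a b h => by
      have := congrArg String.toList h
      simpa [String.toList_ofList] using this)]
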